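-- pv_equiv track=rewrite | github.com/pytest-dev/pytest-bdd | src/pytest_bdd/scenario.py | iterparentnodeids
-- ===== SOURCE A (Python) =====
-- from collections.abc import Iterable, Iterator
--
-- def iterparentnodeids(nodeid: str) -> Iterator[str]:
--     """Return the parent node IDs of a given node ID, inclusive.
--
--     For the node ID
--
--         "testing/code/test_excinfo.py::TestFormattedExcinfo::test_repr_source"
--
--     the result would be
--
--         ""
--         "testing"
--         "testing/code"
--         "testing/code/test_excinfo.py"
--         "testing/code/test_excinfo.py::TestFormattedExcinfo"
--         "testing/code/test_excinfo.py::TestFormattedExcinfo::test_repr_source"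
--
--     Note that / components are only considered until the first ::.
--     """
--     SEP = "/"
--     pos = 0
--     first_colons: int | None = nodeid.find("::")
--     if first_colons == -1:
--         first_colons = None
--     # The root Session node - always present.
--     yield ""
--     # Eagerly consume SEP parts until first colons.
--     while True:
--         at = nodeid.find(SEP, pos, first_colons)
--         if at == -1:
--             break
--         if at > 0:
--             yield nodeid[:at]
--         pos = at + len(SEP)
--     # Eagerly consume :: parts.
--     while True:
--         at = nodeid.find("::", pos)
--         if at == -1:
--             break
--         if at > 0:
--             yield nodeid[:at]
--         pos = at + len("::")
--     # The node ID itself.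
--     if nodeid:
--         yield nodeid
-- ===== SOURCE B (Python) =====
-- def iterparentnodeids(nodeid):
--     """Return the parent node IDs of a given node ID, inclusive.
--
--     Split-then-cumulative-join decomposition: split off the part before the
--     first '::', split that into '/' components, and yield the cumulative
--     joins (skipping empty prefixes), then the cumulative '::' joins.
--     """
--     parts = nodeid.split("::")
--     segs = parts[0].split("/")
--     yield ""
--     for i in range(1, len(segs)):
--         p = "/".join(segs[:i])
--         if p:
--             yield p
--     for i in range(1, len(parts)):
--         p = "::".join(parts[:i])
--         if p:
--             yield p
--     if nodeid:
--         yield nodeid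
-- ===== Notes on version B (the rewrite author's own statement) =====
-- stated objective: simpler
-- what changed: Replaces the stateful find/position scanning loops (with an end-bounded find and a carried position) by splitting the id into '::' parts and the first part into '/' segments once, then yielding cumulative joins of the split pieces.
import Mathlib
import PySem

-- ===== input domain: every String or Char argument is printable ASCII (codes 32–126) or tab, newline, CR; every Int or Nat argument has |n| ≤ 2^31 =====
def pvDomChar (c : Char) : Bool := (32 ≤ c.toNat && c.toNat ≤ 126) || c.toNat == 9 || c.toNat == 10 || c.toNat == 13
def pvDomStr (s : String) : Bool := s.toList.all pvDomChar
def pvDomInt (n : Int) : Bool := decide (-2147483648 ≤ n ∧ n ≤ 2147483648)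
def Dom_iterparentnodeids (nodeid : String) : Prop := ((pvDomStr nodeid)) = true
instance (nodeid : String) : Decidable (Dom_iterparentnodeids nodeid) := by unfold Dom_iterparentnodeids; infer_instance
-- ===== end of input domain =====

-- B replaces A's stateful find/position scanning loops by split-into-components plus cumulative joins (objective: simpler).

-- ===== PORT A =====

-- Termination fact for A's while-loops, cited by pvLoopA's decreasing_by:
-- a successful find(sub, pos, end) result is ≥ pos, and pos is then within the string.
theorem pvFindGo_ge (sub l : List Char) (k : Nat)
    (h : PySem.Chars.find.go sub l k ≠ -1) : (k : Int) ≤ PySem.Chars.find.go sub l k := by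
  induction l generalizing k with
  | nil =>
    simp only [PySem.Chars.find.go] at h ⊢
    split <;> simp_all
  | cons c rest ih =>
    simp only [PySem.Chars.find.go] at h ⊢
    split at h
    · simp_all
    · simp_all
      exact le_trans (by omega) (ih (k + 1) h)

theorem pvFindFrom_facts (s sub : List Char) (p : Nat) (e? : Option Int)
    (h : PySem.Chars.findFrom s sub (p : Int) e? ≠ -1) :
    p ≤ s.length ∧ (p : Int) ≤ PySem.Chars.findFrom s sub (p : Int) e? := by
  have hst : (if (p : Int) < 0 then if (p : Int) + (s.length : Int) < 0 then 0 else (p : Int) + (s.length : Int) else (p : Int)) = (p : Int) := by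
    split <;> omega
  rcases e? with _ | e0
  · simp only [PySem.Chars.findFrom, hst, Int.toNat_natCast, List.take_length] at h ⊢
    by_cases h1 : (s.length : Int) < (p : Int)
    · rw [if_pos h1] at h; exact absurd rfl h
    · rw [if_neg h1] at h ⊢
      by_cases h2 : PySem.Chars.find (List.drop p s) sub = -1
      · rw [if_pos h2] at h; exact absurd rfl h
      · rw [if_neg h2] at h ⊢
        have hg := pvFindGo_ge sub (List.drop p s) 0 (by simpa [PySem.Chars.find] using h2)
        simp only [PySem.Chars.find] at hg ⊢
        constructor <;> omega
  · simp only [PySem.Chars.findFrom, hst] at h ⊢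
    set E := (if (s.length : Int) < e0 then (s.length : Int) else if e0 < 0 then if e0 + (s.length : Int) < 0 then 0 else e0 + (s.length : Int) else e0) with hE
    have hEn : E ≤ (s.length : Int) := by rw [hE]; split <;> [omega; (split <;> [(split <;> omega); omega])]
    by_cases h1 : E < (p : Int)
    · rw [if_pos h1] at h; exact absurd rfl h
    · rw [if_neg h1] at h ⊢
      by_cases h2 : PySem.Chars.find (List.drop ((p : Int)).toNat (List.take E.toNat s)) sub = -1
      · rw [if_pos h2] at h; exact absurd rfl h
      · rw [if_neg h2] at h ⊢
        have hg := pvFindGo_ge sub (List.drop ((p : Int)).toNat (List.take E.toNat s)) 0 (by simpa [PySem.Chars.find] using h2)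
        simp only [PySem.Chars.find] at hg ⊢
        constructor <;> omega

-- A's while-loop: at = nodeid.find(sep, pos, end?); stop at -1; yield nodeid[:at] when at > 0;
-- pos = at + len(sep).  (sep is passed as head::tail so len(sep) ≥ 1 is structural.)
def pvLoopA (c0 : Char) (sp : List Char) (s : List Char) (end? : Option Int)
    (pos : Nat) (acc : List (List Char)) : List (List Char) × Nat :=
  let a := PySem.Chars.findFrom s (c0 :: sp) (pos : Int) end?
  if _h : a = -1 then (acc, pos)
  else pvLoopA c0 sp s end? (a.toNat + (sp.length + 1))
        (acc ++ if 0 < a then [s.take a.toNat] else [])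
termination_by s.length + 1 - pos
decreasing_by
  have hf := pvFindFrom_facts s (c0 :: sp) pos end? _h
  omega

def iterparentnodeids (nodeid : String) : List String :=
  let s := nodeid.toList
  let fc : Int := PySem.Chars.find s [':', ':']
  let firstColons : Option Int := if fc = -1 then none else some fc
  let r1 := pvLoopA '/' [] s firstColons 0 []            -- the SEP="/" loop, bounded by first_colons
  let r2 := pvLoopA ':' [':'] s none r1.2 r1.1           -- the "::" loop, continuing from pos
  ([[]] ++ r2.1 ++ if s ≠ [] then [s] else []).map String.ofList

-- ===== PORT B =====
def iterparentnodeids_alt (nodeid : String) : List String :=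
  let s := nodeid.toList
  let parts := PySem.Chars.splitOn s [':', ':']
  let segs := PySem.Chars.splitOn (parts.headD []) ['/']
  -- for i in range(1, len(segs)): p = "/".join(segs[:i]); if p: yield p   (segs[:i] = take i)
  let slashPrefixes := (PySem.List.pyRange 1 segs.length 1).filterMap (fun i =>
    let p := PySem.Chars.join ['/'] (segs.take i.toNat)
    if p ≠ [] then some p else none)
  let colonPrefixes := (PySem.List.pyRange 1 parts.length 1).filterMap (fun i =>
    let p := PySem.Chars.join [':', ':'] (parts.take i.toNat)
    if p ≠ [] then some p else none)
  ([[]] ++ slashPrefixes ++ colonPrefixes ++ if s ≠ [] then [s] else []).map String.ofList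

-- ===== PRECONDITION & SPEC =====
def Spec_iterparentnodeids (nodeid : String) (out : List String) : Prop := out = iterparentnodeids_alt nodeid
instance (nodeid : String) (out : List String) : Decidable (Spec_iterparentnodeids nodeid out) := by unfold Spec_iterparentnodeids; infer_instance

-- ===== CLAIM (what is proved, stated in full; the proofs are below) =====
def Claim_equal_iterparentnodeids : Prop := ∀ (nodeid : String), Dom_iterparentnodeids nodeid → Spec_iterparentnodeids nodeid (iterparentnodeids nodeid)

-- ===== LEMMAS AND PROOFS =====

-- first match position of sep in l (sep as a prefix of a suffix), if any
def pvFm (sep : List Char) : List Char → Option Nat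
  | [] => none
  | c :: rest => if sep.isPrefixOf (c :: rest) then some 0 else (pvFm sep rest).map (· + 1)

-- positions (offset by k) of the greedy non-overlapping matches of (c0 :: sp) in l
def pvMps (c0 : Char) (sp : List Char) : List Char → Nat → List Nat
  | [], _ => []
  | c :: rest, k =>
    if (c0 :: sp).isPrefixOf (c :: rest) then
      k :: pvMps c0 sp (rest.drop sp.length) (k + (sp.length + 1))
    else pvMps c0 sp rest (k + 1)
termination_by l => l.length
decreasing_by
  all_goals simp

-- pure structural form of Python split by (c0 :: sp)
def pvPsplit (c0 : Char) (sp : List Char) : List Char → List (List Char)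
  | [] => [[]]
  | c :: rest =>
    if (c0 :: sp).isPrefixOf (c :: rest) then [] :: pvPsplit c0 sp (rest.drop sp.length)
    else (pvPsplit c0 sp rest).modifyHead (c :: ·)
termination_by l => l.length
decreasing_by
  all_goals simp

theorem pvFindGo_eq (sep l : List Char) (hsep : sep ≠ []) (k : Nat) :
    PySem.Chars.find.go sep l k = (pvFm sep l).elim (-1 : Int) (fun i => (k : Int) + i) := by
  induction l generalizing k with
  | nil => simp [PySem.Chars.find.go, pvFm, List.isEmpty_iff, hsep]
  | cons c rest ih =>
    simp only [PySem.Chars.find.go, pvFm]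
    split
    · simp
    · rw [ih (k + 1)]
      cases pvFm sep rest <;> simp
      ring

theorem pvFind_eq (sep l : List Char) (hsep : sep ≠ []) :
    PySem.Chars.find l sep = (pvFm sep l).elim (-1 : Int) (fun i => (i : Int)) := by
  have := pvFindGo_eq sep l hsep 0
  simp only [PySem.Chars.find, this]
  cases pvFm sep l <;> simp

theorem pvFm_isPrefix (sep l : List Char) (i : Nat) (h : pvFm sep l = some i) :
    sep.isPrefixOf (l.drop i) = true := by
  induction l generalizing i with
  | nil => simp [pvFm] at h
  | cons c rest ih =>
    simp only [pvFm] at h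
    split at h
    · obtain rfl : i = 0 := by simpa using h.symm
      simp only [List.drop_zero]
      assumption
    · obtain ⟨j, hj, rfl⟩ := Option.map_eq_some_iff.mp h
      simpa [List.drop_succ_cons] using ih j hj

theorem pvFm_bound (sep l : List Char) (i : Nat) (hsep : sep ≠ []) (h : pvFm sep l = some i) :
    i + sep.length ≤ l.length := by
  have hp := pvFm_isPrefix sep l i h
  have hle := (List.isPrefixOf_iff_prefix.mp hp).length_le
  have hlen : 1 ≤ sep.length := by cases sep <;> simp_all
  simp only [List.length_drop] at hle
  omega

theorem pvFm_drop_none (sep l : List Char) (h : pvFm sep l = none) (k : Nat) :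
    pvFm sep (l.drop k) = none := by
  induction l generalizing k with
  | nil => simp [pvFm, List.drop_nil]
  | cons c rest ih =>
    cases k with
    | zero => exact h
    | succ k =>
      simp only [pvFm] at h
      split at h
      · simp at h
      · rw [List.drop_succ_cons]
        exact ih (Option.map_eq_none_iff.mp h) k

theorem pvFm_drop_some (sep l : List Char) (c : Nat) (h : pvFm sep l = some c)
    (k : Nat) (hk : k ≤ c) : pvFm sep (l.drop k) = some (c - k) := by
  induction l generalizing c k with
  | nil => simp [pvFm] at h
  | cons x rest ih =>
    cases k with
    | zero => simpa using h
    | succ k =>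
      simp only [pvFm] at h
      split at h
      · obtain rfl : c = 0 := by simpa using h.symm
        omega
      · obtain ⟨j, hj, rfl⟩ := Option.map_eq_some_iff.mp h
        rw [List.drop_succ_cons]
        rw [ih j hj k (by omega)]
        congr 1
        omega

theorem pvMps_eq_fm (c0 : Char) (sp l : List Char) (k : Nat) :
    pvMps c0 sp l k = (match pvFm (c0 :: sp) l with
      | none => []
      | some i => (k + i) :: pvMps c0 sp (l.drop (i + (sp.length + 1))) (k + i + (sp.length + 1))) := by
  induction l generalizing k with
  | nil => simp [pvMps, pvFm]
  | cons c rest ih =>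
    by_cases hpre : (c0 :: sp).isPrefixOf (c :: rest)
    · simp only [pvMps, pvFm, if_pos hpre]
      simp [List.drop_succ_cons]
    · simp only [pvMps, pvFm, if_neg hpre]
      rw [ih (k + 1)]
      cases hfm : pvFm (c0 :: sp) rest with
      | none => simp
      | some j =>
        simp only [Option.map_some]
        have h1 : k + 1 + j = k + (j + 1) := by omega
        have h2 : (c :: rest).drop (j + 1 + (sp.length + 1)) = rest.drop (j + (sp.length + 1)) := by
          rw [show j + 1 + (sp.length + 1) = (j + (sp.length + 1)) + 1 by omega, List.drop_succ_cons]
        rw [h2, h1]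

theorem pvMps_eq_none (c0 : Char) (sp l : List Char) (k : Nat)
    (h : pvFm (c0 :: sp) l = none) : pvMps c0 sp l k = [] := by
  rw [pvMps_eq_fm, h]

theorem pvMps_eq_some (c0 : Char) (sp l : List Char) (k i : Nat)
    (h : pvFm (c0 :: sp) l = some i) :
    pvMps c0 sp l k
      = (k + i) :: pvMps c0 sp (l.drop (i + (sp.length + 1))) (k + i + (sp.length + 1)) := by
  rw [pvMps_eq_fm, h]

theorem pvMps_bounds (c0 : Char) (sp l : List Char) (k : Nat) :
    ∀ p ∈ pvMps c0 sp l k, k ≤ p ∧ p - k + (sp.length + 1) ≤ l.length := by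
  fun_induction pvMps c0 sp l k with
  | case1 => simp
  | case2 c rest k hpre ih =>
    intro p hp
    have hsp : sp.length ≤ rest.length := by
      have := (List.isPrefixOf_iff_prefix.mp hpre).length_le
      simp at this; omega
    rcases List.mem_cons.mp hp with rfl | hp
    · simp; omega
    · have hb := ih p hp
      simp only [List.length_drop] at hb
      simp only [List.length_cons]
      omega
  | case3 c rest k hpre ih =>
    intro p hp
    have := ih p hp
    simp only [List.length_cons]
    omega

-- no match before the first match: scanning from pos ≤ first match gives the same matches as from 0
theorem pvMps_restart (c0 : Char) (sp s : List Char) (pos : Nat)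
    (h : match pvFm (c0 :: sp) s with | none => True | some c => pos ≤ c) :
    pvMps c0 sp (s.drop pos) pos = pvMps c0 sp s 0 := by
  cases hfm : pvFm (c0 :: sp) s with
  | none =>
    rw [pvMps_eq_fm, pvMps_eq_fm (l := s), hfm, pvFm_drop_none _ _ hfm]
  | some cpos =>
    rw [hfm] at h
    rw [pvMps_eq_fm, pvMps_eq_fm (l := s), hfm, pvFm_drop_some _ _ _ hfm pos h]
    simp only [List.drop_drop]
    have h1 : pos + (cpos - pos) = 0 + cpos := by omega
    have h2 : pos + (cpos - pos + (sp.length + 1)) = cpos + (sp.length + 1) := by omega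
    rw [h1, h2]

theorem pvGetLastD_mem (l : List Nat) (h : l ≠ []) (d : Nat) : l.getLastD d ∈ l := by
  cases l with
  | nil => exact absurd rfl h
  | cons a t =>
    rw [List.getLastD_cons]
    exact List.getLastD_mem_cons

theorem pvPsplit_ne_nil (c0 : Char) (sp l : List Char) : pvPsplit c0 sp l ≠ [] := by
  fun_induction pvPsplit c0 sp l with
  | case1 => simp
  | case2 => simp
  | case3 c rest hpre ih =>
    cases hps : pvPsplit c0 sp rest with
    | nil => exact absurd hps ih
    | cons a t => simp [List.modifyHead]

theorem pvPsplit_eq_fm (c0 : Char) (sp l : List Char) :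
    pvPsplit c0 sp l = (match pvFm (c0 :: sp) l with
      | none => [l]
      | some i => l.take i :: pvPsplit c0 sp (l.drop (i + (sp.length + 1)))) := by
  fun_induction pvPsplit c0 sp l with
  | case1 => simp [pvFm]
  | case2 c rest hpre =>
    simp only [pvFm, if_pos hpre]
    simp [List.drop_succ_cons]
  | case3 c rest hpre ih =>
    simp only [pvFm, if_neg hpre]
    rw [ih]
    cases hfm : pvFm (c0 :: sp) rest with
    | none => simp
    | some j =>
      simp only [Option.map_some, List.modifyHead_cons]
      rw [show j + 1 + (sp.length + 1) = (j + (sp.length + 1)) + 1 by omega, List.drop_succ_cons]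
      simp

theorem pvModifyHead_nil (l : List (List Char)) : l.modifyHead (fun x => x) = l := by
  cases l <;> simp

theorem pvSplitOnGo_eq (c0 : Char) (sp : List Char) (fuel : Nat) :
    ∀ (l cur : List Char) (acc : List (List Char)), l.length ≤ fuel →
    PySem.Chars.splitOn.go (c0 :: sp) fuel l cur acc
      = acc.reverse ++ (pvPsplit c0 sp l).modifyHead (fun x => cur.reverse ++ x) := by
  induction fuel with
  | zero =>
    intro l cur acc hl
    obtain rfl : l = [] := by cases l <;> simp_all
    simp [PySem.Chars.splitOn.go, pvPsplit]
  | succ fuel ih =>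
    intro l cur acc hl
    cases l with
    | nil => simp [PySem.Chars.splitOn.go, pvPsplit]
    | cons c rest =>
      simp only [PySem.Chars.splitOn.go, pvPsplit]
      split
      · rename_i hpre
        rw [ih (List.drop (c0 :: sp).length (c :: rest)) [] (cur.reverse :: acc)
            (by simp only [List.length_drop, List.length_cons] at hl ⊢; omega)]
        simp only [List.length_cons, List.drop_succ_cons, List.reverse_nil, List.reverse_cons]
        rw [show (fun x => ([] : List Char) ++ x) = (fun x => x) by funext x; simp, pvModifyHead_nil]
        simp
      · rename_i hpre
        rw [ih rest (c :: cur) acc (by simp at hl ⊢; omega)]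
        obtain ⟨a, t, hps⟩ : ∃ a t, pvPsplit c0 sp rest = a :: t := by
          cases hps : pvPsplit c0 sp rest with
          | nil => exact absurd hps (pvPsplit_ne_nil c0 sp rest)
          | cons a t => exact ⟨a, t, rfl⟩
        simp [hps, List.modifyHead]

theorem pvSplitOn_eq (c0 : Char) (sp l : List Char) :
    PySem.Chars.splitOn l (c0 :: sp) = pvPsplit c0 sp l := by
  rw [PySem.Chars.splitOn, pvSplitOnGo_eq c0 sp (l.length + 1) l [] [] (by omega)]
  simp only [List.reverse_nil, List.nil_append]
  exact pvModifyHead_nil _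

theorem pvFindFrom_fm_none (c0 : Char) (sp s : List Char) (pos : Nat) :
    PySem.Chars.findFrom s (c0 :: sp) (pos : Int) none
      = (pvFm (c0 :: sp) (s.drop pos)).elim (-1 : Int) (fun i => ((pos : Int) + i)) := by
  by_cases hp : pos ≤ s.length
  · rw [PySem.Chars.findFrom_natCast s (c0 :: sp) pos hp]
    rw [pvFind_eq _ _ (by simp)]
    cases hfm : pvFm (c0 :: sp) (s.drop pos) with
    | none => simp
    | some i => simp [show ¬((i : Nat) : Int) = -1 by omega]
  · have hd : s.drop pos = [] := List.drop_eq_nil_of_le (by omega)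
    rw [hd]
    simp only [pvFm, Option.elim]
    simp only [PySem.Chars.findFrom]
    rw [show (if (pos : Int) < 0 then if (pos : Int) + (s.length : Int) < 0 then 0 else (pos : Int) + (s.length : Int) else (pos : Int)) = (pos : Int) from by split <;> omega]
    rw [if_pos (show (s.length : Int) < (pos : Int) from by omega)]

theorem pvFindFrom_fm_some (c0 : Char) (sp s : List Char) (e : Nat) (he : e ≤ s.length) (pos : Nat) :
    PySem.Chars.findFrom s (c0 :: sp) (pos : Int) (some (e : Int))
      = (pvFm (c0 :: sp) ((s.take e).drop pos)).elim (-1 : Int) (fun i => ((pos : Int) + i)) := by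
  simp only [PySem.Chars.findFrom]
  rw [show (if (pos : Int) < 0 then if (pos : Int) + (s.length : Int) < 0 then 0 else (pos : Int) + (s.length : Int) else (pos : Int)) = (pos : Int) from by split <;> omega]
  rw [show (if (s.length : Int) < (e : Int) then (s.length : Int) else if (e : Int) < 0 then if (e : Int) + (s.length : Int) < 0 then 0 else (e : Int) + (s.length : Int) else (e : Int)) = (e : Int) from by rw [if_neg (by omega), if_neg (by omega)]]
  by_cases h1 : (e : Int) < (pos : Int)
  · rw [if_pos h1]
    have hd : (s.take e).drop pos = [] := List.drop_eq_nil_of_le (by simp; omega)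
    rw [hd]
    simp [pvFm]
  · rw [if_neg h1]
    rw [show ((e : Int)).toNat = e from by omega, show ((pos : Int)).toNat = pos from by omega]
    rw [pvFind_eq _ _ (by simp)]
    cases hfm : pvFm (c0 :: sp) ((s.take e).drop pos) with
    | none => simp
    | some i => simp [show ¬((i : Nat) : Int) = -1 by omega]

-- the A-side loop, characterised by pvMps
theorem pvLoopA_eq (c0 : Char) (sp s : List Char) (e? : Option Int) (t : List Char)
    (ht : (e? = none ∧ t = s) ∨ ∃ e : Nat, e? = some (e : Int) ∧ e ≤ s.length ∧ t = s.take e)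
    (pos : Nat) (acc : List (List Char)) :
    pvLoopA c0 sp s e? pos acc =
      (acc ++ (pvMps c0 sp (t.drop pos) pos).filterMap
          (fun p => if 0 < p then some (s.take p) else none),
       match pvMps c0 sp (t.drop pos) pos with
       | [] => pos
       | m => m.getLastD 0 + (sp.length + 1)) := by
  have hff : ∀ (q : Nat), PySem.Chars.findFrom s (c0 :: sp) (q : Int) e?
      = (pvFm (c0 :: sp) (t.drop q)).elim (-1 : Int) (fun i => ((q : Int) + i)) := by
    intro q
    rcases ht with ⟨rfl, rfl⟩ | ⟨e, rfl, he, rfl⟩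
    · exact pvFindFrom_fm_none c0 sp _ q
    · exact pvFindFrom_fm_some c0 sp _ e he q
  have hts : t.length ≤ s.length := by
    rcases ht with ⟨-, rfl⟩ | ⟨e, -, he, rfl⟩
    · exact le_rfl
    · simp
  clear ht
  obtain ⟨n, hn⟩ : ∃ n, s.length + 1 - pos ≤ n := ⟨_, le_rfl⟩
  induction n generalizing pos acc with
  | zero =>
    have hd : t.drop pos = [] := List.drop_eq_nil_of_le (by omega)
    rw [pvLoopA, hff pos, hd]
    simp [pvMps, pvFm]
  | succ n ihn =>
    rw [pvLoopA]
    simp only [hff pos]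
    cases hfm : pvFm (c0 :: sp) (t.drop pos) with
    | none =>
      rw [pvMps_eq_none c0 sp _ pos hfm]
      simp
    | some i =>
      simp only [Option.elim]
      rw [dif_neg (show ¬((pos : Int) + (i : Int) = -1) from by omega)]
      rw [show ((pos : Int) + (i : Int)).toNat = pos + i from by omega]
      rw [ihn (pos + i + (sp.length + 1)) _ (by omega)]
      rw [pvMps_eq_some c0 sp _ pos i hfm]
      have hdd : (t.drop pos).drop (i + (sp.length + 1)) = t.drop (pos + i + (sp.length + 1)) := by
        rw [List.drop_drop]
        congr 1
        omega
      rw [hdd]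
      rw [Prod.mk.injEq]
      constructor
      · rw [List.filterMap_cons]
        by_cases hpi : 0 < pos + i
        · rw [if_pos (show (0 : Int) < (pos : Int) + (i : Int) from by omega),
              if_pos hpi]
          simp [List.append_assoc]
        · rw [if_neg (show ¬((0 : Int) < (pos : Int) + (i : Int)) from by omega),
              if_neg hpi]
          simp
      · cases hM : pvMps c0 sp (t.drop (pos + i + (sp.length + 1))) (pos + i + (sp.length + 1)) with
        | nil => simp
        | cons x xs =>
          simp [List.getLastD_eq_getLast?, List.getLast?_cons_cons]

theorem pvJoin_cons_head (sep : List Char) (c : Char) (h : List Char) (xs : List (List Char)) :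
    PySem.Chars.join sep ((c :: h) :: xs) = c :: PySem.Chars.join sep (h :: xs) := by
  cases xs with
  | nil => simp [PySem.Chars.join_singleton]
  | cons y ys => simp [PySem.Chars.join_cons_cons]

theorem pvJoin_nil_head (sep : List Char) (xs : List (List Char)) (h : xs ≠ []) :
    PySem.Chars.join sep ([] :: xs) = sep ++ PySem.Chars.join sep xs := by
  cases xs with
  | nil => exact absurd rfl h
  | cons y ys => simp [PySem.Chars.join_cons_cons]

theorem pvTake_cons_of_psplit_ne_nil (c0 : Char) (sp u : List Char) (j : Nat) :
    (pvPsplit c0 sp u).take (j + 1) ≠ [] := by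
  have := pvPsplit_ne_nil c0 sp u
  simp [List.take_eq_nil_iff, this]

-- the B-side cumulative joins, characterised by pvMps
theorem pvJoins_eq (c0 : Char) (sp s : List Char) : ∀ (k : Nat),
    (List.range ((pvPsplit c0 sp s).length - 1)).map
        (fun j => PySem.Chars.join (c0 :: sp) ((pvPsplit c0 sp s).take (j + 1)))
      = (pvMps c0 sp s k).map (fun p => s.take (p - k)) := by
  fun_induction pvPsplit c0 sp s with
  | case1 =>
    intro k
    simp [pvMps]
  | case2 c rest hpre ih =>
    intro k
    obtain ⟨u', hu⟩ := List.isPrefixOf_iff_prefix.mp hpre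
    have hc0 : c0 = c := by
      have := congrArg (fun l => l.head?) hu
      simpa using this
    have hrest : sp ++ u' = rest := by
      rw [List.cons_append] at hu
      exact (List.cons.injEq _ _ _ _ ▸ hu :
        c0 = c ∧ sp ++ u' = rest).2
    have hdrop : rest.drop sp.length = u' := by rw [← hrest, List.drop_left]
    have hPne := pvPsplit_ne_nil c0 sp (rest.drop sp.length)
    obtain ⟨plen, hplen⟩ : ∃ m, (pvPsplit c0 sp (rest.drop sp.length)).length = m + 1 := by
      cases hP : pvPsplit c0 sp (rest.drop sp.length) with
      | nil => exact absurd hP hPne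
      | cons a t => exact ⟨t.length, by simp⟩
    simp only [if_pos hpre, pvMps]
    simp only [List.length_cons, hplen, Nat.add_sub_cancel, List.range_succ_eq_map,
      List.map_cons, List.map_map]
    refine congrArg₂ List.cons ?_ ?_
    · simp [PySem.Chars.join_singleton]
    · have hstep : ∀ j ∈ List.range plen,
          ((fun j => PySem.Chars.join (c0 :: sp)
              (([] :: pvPsplit c0 sp (rest.drop sp.length)).take (j + 1))) ∘ Nat.succ) j
            = (c0 :: sp) ++ PySem.Chars.join (c0 :: sp)
                ((pvPsplit c0 sp (rest.drop sp.length)).take (j + 1)) := by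
        intro j _
        simp only [Function.comp_apply, Nat.succ_eq_add_one, List.take_succ_cons]
        exact pvJoin_nil_head _ _ (pvTake_cons_of_psplit_ne_nil c0 sp _ j)
      rw [List.map_congr_left hstep]
      have hIH := ih (k + (sp.length + 1))
      rw [hplen, Nat.add_sub_cancel] at hIH
      calc (List.range plen).map (fun j => (c0 :: sp) ++ PySem.Chars.join (c0 :: sp)
              ((pvPsplit c0 sp (rest.drop sp.length)).take (j + 1)))
          = ((List.range plen).map (fun j => PySem.Chars.join (c0 :: sp)
              ((pvPsplit c0 sp (rest.drop sp.length)).take (j + 1)))).map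
                (fun x => (c0 :: sp) ++ x) := by rw [List.map_map]; rfl
        _ = ((pvMps c0 sp (rest.drop sp.length) (k + (sp.length + 1))).map
              (fun p => (rest.drop sp.length).take (p - (k + (sp.length + 1))))).map
                (fun x => (c0 :: sp) ++ x) := by rw [hIH]
        _ = (pvMps c0 sp (rest.drop sp.length) (k + (sp.length + 1))).map
              (fun p => (c :: rest).take (p - k)) := by
            rw [List.map_map]
            refine List.map_congr_left ?_
            intro p hp
            have hb := pvMps_bounds c0 sp _ _ p hp
            simp only [Function.comp_apply]
            have hsplit : c :: rest = (c0 :: sp) ++ rest.drop sp.length := by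
              rw [hdrop, ← hu]
            rw [hsplit]
            rw [show p - k = (c0 :: sp).length + (p - (k + (sp.length + 1))) from by
              simp only [List.length_cons]; omega]
            rw [List.take_append, List.take_of_length_le (Nat.le_add_right _ _)]
            rw [show (c0 :: sp).length + (p - (k + (sp.length + 1))) - (c0 :: sp).length
                  = p - (k + (sp.length + 1)) from by omega]
  | case3 c rest hpre ih =>
    intro k
    obtain ⟨h0, t0, hP⟩ : ∃ a t, pvPsplit c0 sp rest = a :: t := by
      cases hP : pvPsplit c0 sp rest with
      | nil => exact absurd hP (pvPsplit_ne_nil c0 sp rest)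
      | cons a t => exact ⟨a, t, rfl⟩
    simp only [if_neg hpre, pvMps, hP, List.modifyHead_cons]
    have hIH := ih (k + 1)
    rw [hP] at hIH
    simp only [List.length_cons, Nat.add_sub_cancel] at hIH ⊢
    have hstep : ∀ j ∈ List.range t0.length,
        PySem.Chars.join (c0 :: sp) (((c :: h0) :: t0).take (j + 1))
          = c :: PySem.Chars.join (c0 :: sp) ((h0 :: t0).take (j + 1)) := by
      intro j _
      simp only [List.take_succ_cons]
      exact pvJoin_cons_head _ _ _ _
    rw [List.map_congr_left hstep]
    calc (List.range t0.length).map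
            (fun j => c :: PySem.Chars.join (c0 :: sp) ((h0 :: t0).take (j + 1)))
        = ((List.range t0.length).map
            (fun j => PySem.Chars.join (c0 :: sp) ((h0 :: t0).take (j + 1)))).map
              (fun x => c :: x) := by rw [List.map_map]; rfl
      _ = ((pvMps c0 sp rest (k + 1)).map (fun p => rest.take (p - (k + 1)))).map
              (fun x => c :: x) := by rw [hIH]
      _ = (pvMps c0 sp rest (k + 1)).map (fun p => (c :: rest).take (p - k)) := by
            rw [List.map_map]
            refine List.map_congr_left ?_
            intro p hp
            have hb := pvMps_bounds c0 sp _ _ p hp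
            simp only [Function.comp_apply]
            rw [show p - k = (p - (k + 1)) + 1 from by omega, List.take_succ_cons]

theorem pvPsplit_eq_none (c0 : Char) (sp l : List Char) (h : pvFm (c0 :: sp) l = none) :
    pvPsplit c0 sp l = [l] := by
  rw [pvPsplit_eq_fm, h]

theorem pvPsplit_eq_some (c0 : Char) (sp l : List Char) (i : Nat)
    (h : pvFm (c0 :: sp) l = some i) :
    pvPsplit c0 sp l = l.take i :: pvPsplit c0 sp (l.drop (i + (sp.length + 1))) := by
  rw [pvPsplit_eq_fm, h]

-- B's filtered prefix chunk equals A's filtered pvMps chunk (both over the region u)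
theorem pvChunk_eq (c0 : Char) (sp u : List Char) :
    (PySem.List.pyRange 1 (pvPsplit c0 sp u).length 1).filterMap (fun i =>
        if PySem.Chars.join (c0 :: sp) ((pvPsplit c0 sp u).take i.toNat) ≠ []
        then some (PySem.Chars.join (c0 :: sp) ((pvPsplit c0 sp u).take i.toNat)) else none)
      = (pvMps c0 sp u 0).filterMap (fun p => if 0 < p then some (u.take p) else none) := by
  have hPne := pvPsplit_ne_nil c0 sp u
  have hpos : 0 < (pvPsplit c0 sp u).length := by
    cases hP : pvPsplit c0 sp u with
    | nil => exact absurd hP hPne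
    | cons a t => simp
  rw [PySem.List.pyRange_one]
  rw [show ((((pvPsplit c0 sp u).length : Int)) - 1).toNat = (pvPsplit c0 sp u).length - 1 from by omega]
  rw [List.filterMap_map]
  calc (List.range ((pvPsplit c0 sp u).length - 1)).filterMap
          ((fun i : Int =>
            if PySem.Chars.join (c0 :: sp) ((pvPsplit c0 sp u).take i.toNat) ≠ []
            then some (PySem.Chars.join (c0 :: sp) ((pvPsplit c0 sp u).take i.toNat)) else none)
            ∘ (fun k : Nat => (1 : Int) + (k : Int)))
      = (List.range ((pvPsplit c0 sp u).length - 1)).filterMap (fun j =>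
          if PySem.Chars.join (c0 :: sp) ((pvPsplit c0 sp u).take (j + 1)) ≠ []
          then some (PySem.Chars.join (c0 :: sp) ((pvPsplit c0 sp u).take (j + 1))) else none) := by
        refine List.filterMap_congr ?_
        intro j _
        simp only [Function.comp_apply]
        rw [show ((1 : Int) + (j : Int)).toNat = j + 1 from by omega]
    _ = ((List.range ((pvPsplit c0 sp u).length - 1)).map (fun j =>
          PySem.Chars.join (c0 :: sp) ((pvPsplit c0 sp u).take (j + 1)))).filterMap
            (fun p => if p ≠ [] then some p else none) := by
        rw [List.filterMap_map]
        rfl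
    _ = ((pvMps c0 sp u 0).map (fun p => u.take (p - 0))).filterMap
            (fun p => if p ≠ [] then some p else none) := by
        rw [pvJoins_eq c0 sp u 0]
    _ = (pvMps c0 sp u 0).filterMap (fun p =>
          if u.take (p - 0) ≠ [] then some (u.take (p - 0)) else none) := by
        rw [List.filterMap_map]
        rfl
    _ = (pvMps c0 sp u 0).filterMap (fun p => if 0 < p then some (u.take p) else none) := by
        refine List.filterMap_congr ?_
        intro p hp
        have hb := pvMps_bounds c0 sp u 0 p hp
        simp only [Nat.sub_zero]
        by_cases h0 : 0 < p
        · have hne : u.take p ≠ [] := by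
            simp only [ne_eq, List.take_eq_nil_iff]
            intro hc
            rcases hc with hc | rfl
            · omega
            · simp only [List.length_nil] at hb
              omega
          rw [if_pos h0, if_pos hne]
        · rw [if_neg h0]
          rw [show p = 0 from by omega]
          simp

-- ===== VERDICT (by name: the statement is the Claim_ definition above) =====
theorem iterparentnodeids_spec : Claim_equal_iterparentnodeids := by
  intro nodeid _
  unfold Spec_iterparentnodeids iterparentnodeids iterparentnodeids_alt
  simp only [pvSplitOn_eq ':' [':'], pvSplitOn_eq '/' [],
    pvFind_eq [':', ':'] nodeid.toList (by simp)]
  generalize nodeid.toList = s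
  cases hfm : pvFm [':', ':'] s with
  | none =>
    simp only [Option.elim, if_true]
    rw [pvLoopA_eq '/' [] s none s (Or.inl ⟨rfl, rfl⟩) 0 []]
    rw [pvLoopA_eq ':' [':'] s none s (Or.inl ⟨rfl, rfl⟩)]
    have hcol : ∀ pos : Nat, pvMps ':' [':'] (s.drop pos) pos = [] := fun pos =>
      pvMps_eq_none _ _ _ _ (pvFm_drop_none _ _ hfm pos)
    rw [pvChunk_eq ':' [':'] s, pvChunk_eq '/' [] ((pvPsplit ':' [':'] s).headD [])]
    rw [pvPsplit_eq_none ':' [':'] s hfm]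
    simp only [List.headD_cons]
    rw [pvMps_eq_none ':' [':'] s 0 hfm]
    simp only [hcol, List.drop_zero, List.filterMap_nil, List.append_nil, List.nil_append]
  | some cpos =>
    simp only [Option.elim]
    rw [if_neg (show ¬((cpos : Nat) : Int) = -1 from by omega)]
    have hb2 : cpos + 2 ≤ s.length := by
      have := pvFm_bound [':', ':'] s cpos (by simp) hfm
      simpa using this
    rw [pvLoopA_eq '/' [] s (some (cpos : Int)) (s.take cpos)
        (Or.inr ⟨cpos, rfl, by omega, rfl⟩) 0 []]
    rw [pvLoopA_eq ':' [':'] s none s (Or.inl ⟨rfl, rfl⟩)]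
    have hlen : (s.take cpos).length = cpos := by
      simp only [List.length_take]
      omega
    have hpos1 : ∀ m : List Nat, (∀ p ∈ m, p + 1 ≤ cpos) →
        (match m with
          | [] => 0
          | m => m.getLastD 0 + (List.length ([] : List Char) + 1)) ≤ cpos := by
      intro m hm
      cases m with
      | nil => exact Nat.zero_le cpos
      | cons x xs =>
        show (x :: xs).getLastD 0 + (List.length ([] : List Char) + 1) ≤ cpos
        have := hm _ (pvGetLastD_mem (x :: xs) (by simp) 0)
        simpa using this
    have hmb : ∀ p ∈ pvMps '/' [] ((s.take cpos).drop 0) 0, p + 1 ≤ cpos := by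
      intro p hp
      have hb := pvMps_bounds '/' [] ((s.take cpos).drop 0) 0 p hp
      simp only [List.drop_zero, List.length_take, List.length_nil, Nat.sub_zero] at hb
      omega
    rw [pvMps_restart ':' [':'] s _ (by rw [hfm]; exact hpos1 _ hmb)]
    rw [pvChunk_eq ':' [':'] s, pvChunk_eq '/' [] ((pvPsplit ':' [':'] s).headD [])]
    rw [pvPsplit_eq_some ':' [':'] s cpos hfm]
    simp only [List.headD_cons]
    have hsl : (pvMps '/' [] (s.take cpos) 0).filterMap
          (fun p => if 0 < p then some (s.take p) else none)
        = (pvMps '/' [] (s.take cpos) 0).filterMap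
          (fun p => if 0 < p then some ((s.take cpos).take p) else none) := by
      refine List.filterMap_congr ?_
      intro p hp
      have hb := pvMps_bounds '/' [] (s.take cpos) 0 p hp
      have hpc : p ≤ cpos := by
        simp only [List.length_nil, Nat.sub_zero, hlen] at hb
        omega
      rw [List.take_take, min_eq_left hpc]
    simp only [List.drop_zero]
    rw [hsl]
    simp [List.append_assoc]
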